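-- pv_equiv track=rewrite | github.com/stephanejouve/magma-cycling | magma_cycling/external/scraper/patterns.py | _find_repeating_block
-- ===== SOURCE A (Python) =====
-- def _find_repeating_block(
--     powers: list[int],
--     min_block_len: int = 3,
--     min_repeats: int = 3,
-- ) -> list[int] | None:
--     """Find shortest repeating block in a power sequence.
--
--     Args:
--         powers: List of power values
--         min_block_len: Minimum block length to consider
--         min_repeats: Minimum number of consecutive repetitions
--
--     Returns:
--         The repeating block if found, None otherwise
--     """
--     n = len(powers)
--     if n < min_block_len * min_repeats:
--         return None
--
--     for block_len in range(min_block_len, n // min_repeats + 1):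
--         block = powers[:block_len]
--         repeats = 0
--         for i in range(0, n, block_len):
--             chunk = powers[i : i + block_len]
--             if len(chunk) == block_len and chunk == block:
--                 repeats += 1
--             else:
--                 break
--         if repeats >= min_repeats:
--             return block
--     return None
-- ===== SOURCE B (Python) =====
-- def _find_repeating_block(
--     powers: list[int],
--     min_block_len: int = 3,
--     min_repeats: int = 3,
-- ) -> list[int] | None:
--     """Shortest repeating prefix block via the self-overlap characterization:
--     the prefix of length L repeats min_repeats times iff
--     powers[L : L*min_repeats] == powers[: L*(min_repeats-1)]."""
--     n = len(powers)
--     for L in range(min_block_len, n // min_repeats + 1):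
--         if powers[L : L * min_repeats] == powers[: L * (min_repeats - 1)]:
--             return powers[:L]
--     return None
-- ===== Notes on version B (the rewrite author's own statement) =====
-- stated objective: simpler
-- what changed: B replaces A's inner chunk-counting loop (slice each chunk, compare to the block, count a leading run with break) by a single self-overlap comparison per candidate length: the prefix of length L repeats min_repeats times iff powers[L:L*min_repeats] == powers[:L*(min_repeats-1)]; the early-exit guard becomes redundant and is dropped.
-- outside the precondition, e.g. on _find_repeating_block([0, 1, 0, 1, 0, 1], -3, -2): A returns [0, 1, 0], B returns None; on _find_repeating_block([1, 2, 3], 0, 1): A raises ValueError, B returns []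
import Mathlib
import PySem

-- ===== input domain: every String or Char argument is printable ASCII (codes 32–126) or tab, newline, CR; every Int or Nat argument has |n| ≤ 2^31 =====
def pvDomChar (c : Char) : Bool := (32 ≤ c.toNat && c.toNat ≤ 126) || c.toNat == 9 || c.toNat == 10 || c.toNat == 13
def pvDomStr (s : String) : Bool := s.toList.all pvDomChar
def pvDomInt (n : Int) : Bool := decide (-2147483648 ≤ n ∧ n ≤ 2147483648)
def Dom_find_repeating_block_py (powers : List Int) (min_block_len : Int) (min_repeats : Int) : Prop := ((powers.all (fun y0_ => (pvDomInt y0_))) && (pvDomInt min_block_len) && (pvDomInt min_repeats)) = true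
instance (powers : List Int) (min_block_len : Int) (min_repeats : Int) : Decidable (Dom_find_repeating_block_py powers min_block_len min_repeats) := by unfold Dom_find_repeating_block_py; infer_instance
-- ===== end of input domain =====

-- B replaces A's chunk-counting inner loop by one self-overlap slice comparison per candidate
-- length (powers[L:L*m] == powers[:L*(m-1)]), dropping the redundant early guard; objective: simpler.


-- ===== PORT A =====
-- inner loop: for i in range(0, n, block_len): chunk = powers[i:i+block_len]; count matches, break on mismatch
def pyA_chunkLoop (powers block : List Int) (block_len : Int) : List Int → Int → Int
  | [], repeats => repeats
  | i :: rest, repeats =>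
      let chunk := PySem.List.slice powers (some i) (some (i + block_len))
      if (chunk.length : Int) = block_len ∧ chunk = block then
        pyA_chunkLoop powers block block_len rest (repeats + 1)
      else repeats

-- outer loop: for block_len in range(min_block_len, n // min_repeats + 1), with return
def pyA_outer (powers : List Int) (min_repeats n : Int) : List Int → Option (List Int)
  | [] => none
  | block_len :: rest =>
      let block := PySem.List.slice powers none (some block_len)
      let repeats := pyA_chunkLoop powers block block_len (PySem.List.pyRange 0 n block_len) 0
      if min_repeats ≤ repeats then some block
      else pyA_outer powers min_repeats n rest

-- n = len(powers) written inline as (powers.length : Int)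
def find_repeating_block_py (powers : List Int) (min_block_len : Int) (min_repeats : Int) : Option (List Int) :=
  if (powers.length : Int) < min_block_len * min_repeats then none
  else pyA_outer powers min_repeats (powers.length : Int)
        (PySem.List.pyRange min_block_len (PySem.Int.floordiv (powers.length : Int) min_repeats + 1) 1)

-- ===== PORT B =====
def pyB_loop (powers : List Int) (min_repeats : Int) : List Int → Option (List Int)
  | [] => none
  | L :: rest =>
      if PySem.List.slice powers (some L) (some (L * min_repeats)) =
         PySem.List.slice powers none (some (L * (min_repeats - 1))) then
        some (PySem.List.slice powers none (some L))
      else pyB_loop powers min_repeats rest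

def find_repeating_block_py_alt (powers : List Int) (min_block_len : Int) (min_repeats : Int) : Option (List Int) :=
  pyB_loop powers min_repeats
    (PySem.List.pyRange min_block_len (PySem.Int.floordiv (powers.length : Int) min_repeats + 1) 1)

-- ===== PRECONDITION & SPEC =====
-- Pre_ excludes min_repeats = 0 (A raises ZeroDivisionError) and non-positive min_block_len,
-- where A raises ValueError from range(0, n, 0) on most inputs and, on the few where a negative
-- min_repeats lets it return, yields a negative-slice artefact of its implementation.
def Pre_find_repeating_block_py (powers : List Int) (min_block_len : Int) (min_repeats : Int) : Prop :=
  1 ≤ min_block_len ∧ min_repeats ≠ 0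
instance (powers : List Int) (min_block_len : Int) (min_repeats : Int) : Decidable (Pre_find_repeating_block_py powers min_block_len min_repeats) := by unfold Pre_find_repeating_block_py; infer_instance

def pvWitness_find_repeating_block_py : List Int × Int × Int := ([1, 2, 1, 2, 1, 2], 1, 3)

def Spec_find_repeating_block_py (powers : List Int) (min_block_len : Int) (min_repeats : Int) (out : Option (List Int)) : Prop := out = find_repeating_block_py_alt powers min_block_len min_repeats
instance (powers : List Int) (min_block_len : Int) (min_repeats : Int) (out : Option (List Int)) : Decidable (Spec_find_repeating_block_py powers min_block_len min_repeats out) := by unfold Spec_find_repeating_block_py; infer_instance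

-- ===== CLAIM (what is proved, stated in full; the proofs are below) =====
def Claim_equal_find_repeating_block_py : Prop := ∀ (powers : List Int) (min_block_len : Int) (min_repeats : Int), Dom_find_repeating_block_py powers min_block_len min_repeats → Pre_find_repeating_block_py powers min_block_len min_repeats → Spec_find_repeating_block_py powers min_block_len min_repeats (find_repeating_block_py powers min_block_len min_repeats)

-- ===== LEMMAS AND PROOFS =====

-- leading-run counter equivalent to pyA_chunkLoop's accumulator
def countLead (cond : Int → Bool) : List Int → Int
  | [] => 0
  | i :: rest => if cond i then countLead cond rest + 1 else 0

def condA (powers block : List Int) (L i : Int) : Bool :=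
  let chunk := PySem.List.slice powers (some i) (some (i + L))
  decide (((chunk.length : Int) = L) ∧ chunk = block)

lemma countLead_nonneg (cond : Int → Bool) : ∀ is, 0 ≤ countLead cond is := by
  intro is; induction is with
  | nil => simp [countLead]
  | cons i rest ih => simp only [countLead]; split <;> omega

lemma chunkLoop_eq_countLead (powers block : List Int) (L : Int) :
    ∀ is r, pyA_chunkLoop powers block L is r = r + countLead (condA powers block L) is := by
  intro is; induction is with
  | nil => intro r; simp [pyA_chunkLoop, countLead]
  | cons i rest ih =>
      intro r
      simp only [pyA_chunkLoop, countLead, condA, decide_eq_true_eq]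
      split
      · rw [ih]; ring
      · ring

lemma pyRange_pos_cons (a b s : Int) (hs : 0 < s) (hab : a < b) :
    PySem.List.pyRange a b s = a :: PySem.List.pyRange (a + s) b s := by
  rw [PySem.List.pyRange_of_pos _ _ hs, PySem.List.pyRange_of_pos _ _ hs]
  rw [if_pos hab]
  have h1 : (1 : Int) ≤ (b - a + s - 1) / s := by
    rw [Int.le_ediv_iff_mul_le hs]; omega
  by_cases h2 : a + s < b
  · have hc : (b - a + s - 1) / s = (b - (a + s) + s - 1) / s + 1 := by
      have : b - a + s - 1 = (b - (a + s) + s - 1) + 1 * s := by ring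
      rw [this, Int.add_mul_ediv_right _ _ (by omega)]
    have hnn : 0 ≤ (b - (a + s) + s - 1) / s := Int.ediv_nonneg (by omega) (by omega)
    rw [if_pos h2, hc]
    have htn : ((b - (a + s) + s - 1) / s + 1).toNat = ((b - (a + s) + s - 1) / s).toNat + 1 := by
      omega
    rw [htn, List.range_succ_eq_map, List.map_cons, List.map_map]
    refine congrArg₂ List.cons (by simp) ?_
    apply List.map_congr_left
    intro k _
    simp only [Function.comp, Nat.succ_eq_add_one]
    push_cast
    ring
  · have hc : (b - a + s - 1) / s = 1 := by
      have hlt : (b - a + s - 1) / s < 2 := by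
        rw [Int.ediv_lt_iff_lt_mul hs]; omega
      omega
    rw [if_neg h2, hc]
    simp

-- first-j-indices characterisation of the leading-run count
lemma le_countLead_iff (cond : Int → Bool) (L : Int) (hs : 0 < L) :
    ∀ (j : Nat) (a n : Int), a + ((j : Int) - 1) * L < n →
      ((j : Int) ≤ countLead cond (PySem.List.pyRange a n L) ↔
        ∀ t : Nat, t < j → cond (a + (t : Int) * L) = true) := by
  intro j
  induction j with
  | zero => intro a n _; simp; exact countLead_nonneg cond _
  | succ j ih =>
      intro a n hlt
      have ha : a < n := by
        have : (0 : Int) ≤ (j : Int) * L := by positivity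
        push_cast at hlt; nlinarith
      rw [pyRange_pos_cons a n L hs ha]
      simp only [countLead]
      by_cases hc : cond a = true
      · rw [if_pos hc]
        have ih' := ih (a + L) n (by push_cast at hlt ⊢; nlinarith)
        constructor
        · intro h t ht
          rcases Nat.eq_zero_or_pos t with rfl | htpos
          · simpa using hc
          · obtain ⟨s, rfl⟩ := Nat.exists_eq_add_of_lt htpos
            have := (ih'.mp (by push_cast at h ⊢; omega)) s (by omega)
            have harith : a + L + (s : Int) * L = a + ((0 + s + 1 : Nat) : Int) * L := by
              push_cast; ring
            rwa [harith] at this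
        · intro h
          have h' : ∀ t : Nat, t < j → cond (a + L + (t : Int) * L) = true := by
            intro t ht
            have := h (t + 1) (by omega)
            have harith : a + ((t + 1 : Nat) : Int) * L = a + L + (t : Int) * L := by
              push_cast; ring
            rwa [harith] at this
          have := ih'.mpr h'
          push_cast at this ⊢; omega
      · rw [if_neg hc]
        constructor
        · intro h; exfalso; push_cast at h; omega
        · intro h; exfalso; exact hc (by simpa using h 0 (by omega))

-- self-overlap ↔ all chunks equal the first block
lemma overlap_iff (xs : List Int) (l : Nat) (hl : 1 ≤ l) :
    ∀ k : Nat, l * (k + 1) ≤ xs.length →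
      (((xs.drop l).take (l * k) = xs.take (l * k)) ↔
        ∀ t : Nat, t < k + 1 → (xs.drop (l * t)).take l = xs.take l) := by
  intro k
  induction k with
  | zero =>
      intro _
      constructor
      · intro _ t ht
        have : t = 0 := by omega
        simp [this]
      · intro _; simp
  | succ k ih =>
      intro hlen
      have hms : l * (k + 1 + 1) = l * (k + 1) + l := Nat.mul_succ l (k + 1)
      have hms' : l * (k + 1) = l * k + l := Nat.mul_succ l k
      have hlen' : l * (k + 1) ≤ xs.length := by omega
      constructor
      · intro h t ht
        have hpre : (xs.drop l).take (l * k) = xs.take (l * k) := by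
          have := congrArg (List.take (l * k)) h
          simpa [List.take_take, Nat.min_eq_left (by omega : l * k ≤ l * (k + 1))] using this
        rcases Nat.lt_or_ge t (k + 1) with h1 | h1
        · exact (ih hlen').mp hpre t h1
        · have ht' : t = k + 1 := by omega
          subst ht'
          have e1 := congrArg (List.drop (l * k)) h
          rw [List.drop_take, List.drop_take] at e1
          have hsub : l * (k + 1) - l * k = l := by omega
          rw [hsub] at e1
          rw [List.drop_drop] at e1
          have hidx : l + l * k = l * (k + 1) := by omega
          rw [hidx] at e1
          -- e1 : (xs.drop (l*(k+1))).take l = (xs.drop (l*k)).take l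
          rw [e1]
          exact (ih hlen').mp hpre k (by omega)
      · intro h
        have hpre : (xs.drop l).take (l * k) = xs.take (l * k) :=
          (ih hlen').mpr (fun t ht => h t (by omega))
        have hk1 : (xs.drop (l * (k + 1))).take l = (xs.drop (l * k)).take l := by
          rw [h (k + 1) (by omega), h k (by omega)]
        calc (xs.drop l).take (l * (k + 1))
            = (xs.drop l).take (l * k) ++ ((xs.drop l).drop (l * k)).take l := by
              rw [hms', List.take_add]
          _ = xs.take (l * k) ++ (xs.drop (l * (k + 1))).take l := by
              rw [hpre, List.drop_drop, (by omega : l + l * k = l * (k + 1))]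
          _ = xs.take (l * k) ++ (xs.drop (l * k)).take l := by rw [hk1]
          _ = xs.take (l * k + l) := by rw [List.take_add]
          _ = xs.take (l * (k + 1)) := by rw [hms']

lemma condA_char (powers : List Int) (l : Nat) (t : Nat) (hl : 1 ≤ l)
    (hlen : l * t + l ≤ powers.length) :
    (condA powers (powers.take l) ((l : Nat) : Int) (((l * t : Nat) : Int)) = true ↔
      (powers.drop (l * t)).take l = powers.take l) := by
  unfold condA
  have hcast : ((l * t : Nat) : Int) + ((l : Nat) : Int) = (((l * t + l : Nat) : Nat) : Int) := by
    push_cast; ring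
  rw [hcast, PySem.List.slice_natCast]
  have hsub : l * t + l - l * t = l := by omega
  rw [hsub]
  have hlength : ((powers.drop (l * t)).take l).length = l := by
    simp [List.length_take, List.length_drop]; omega
  simp [hlength]

-- A's per-candidate decision agrees with B's per-candidate comparison
lemma cand_iff (powers : List Int) (L m : Int) (hm : 1 ≤ m) (hL : 1 ≤ L)
    (hLm : L * m ≤ (powers.length : Int)) :
    ((m ≤ pyA_chunkLoop powers (PySem.List.slice powers none (some L)) L
        (PySem.List.pyRange 0 (powers.length : Int) L) 0) ↔
      PySem.List.slice powers (some L) (some (L * m)) =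
        PySem.List.slice powers none (some (L * (m - 1)))) := by
  obtain ⟨l, rfl⟩ : ∃ l : Nat, L = (l : Int) := ⟨L.toNat, (Int.toNat_of_nonneg (by omega)).symm⟩
  obtain ⟨k1, rfl⟩ : ∃ k1 : Nat, m = (k1 : Int) := ⟨m.toNat, (Int.toNat_of_nonneg (by omega)).symm⟩
  have hl : 1 ≤ l := by exact_mod_cast hL
  have hk1 : 1 ≤ k1 := by exact_mod_cast hm
  have hN : l * k1 ≤ powers.length := by exact_mod_cast hLm
  obtain ⟨k, rfl⟩ : ∃ k : Nat, k1 = k + 1 := ⟨k1 - 1, by omega⟩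
  have hNpos : 1 ≤ powers.length := by nlinarith
  rw [chunkLoop_eq_countLead, PySem.List.slice_to_natCast, zero_add]
  rw [le_countLead_iff _ _ (by exact_mod_cast hl) (k + 1) 0 (powers.length : Int)
      (by push_cast; nlinarith)]
  have hAside : (∀ t : Nat, t < k + 1 →
      condA powers (powers.take l) ((l : Nat) : Int) (0 + (t : Int) * ((l : Nat) : Int)) = true) ↔
      (∀ t : Nat, t < k + 1 → (powers.drop (l * t)).take l = powers.take l) := by
    constructor
    · intro h t ht
      have := h t ht
      have hc : (0 : Int) + (t : Int) * ((l : Nat) : Int) = ((l * t : Nat) : Int) := by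
        push_cast; ring
      rw [hc] at this
      exact (condA_char powers l t hl (by nlinarith)).mp this
    · intro h t ht
      have hc : (0 : Int) + (t : Int) * ((l : Nat) : Int) = ((l * t : Nat) : Int) := by
        push_cast; ring
      rw [hc]
      exact (condA_char powers l t hl (by nlinarith)).mpr (h t ht)
  rw [hAside]
  have hB1 : ((l : Nat) : Int) * ((k + 1 : Nat) : Int) = ((l * (k + 1) : Nat) : Int) := by
    push_cast; ring
  have hB2 : ((l : Nat) : Int) * (((k + 1 : Nat) : Int) - 1) = ((l * k : Nat) : Int) := by
    push_cast; ring
  rw [hB1, hB2, PySem.List.slice_natCast, PySem.List.slice_to_natCast]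
  have hsub : l * (k + 1) - l = l * k := by rw [Nat.mul_succ]; omega
  rw [hsub]
  exact (overlap_iff powers l hl k hN).symm

lemma loops_eq (powers : List Int) (m n : Int) :
    ∀ cands : List Int,
      (∀ L ∈ cands,
        ((m ≤ pyA_chunkLoop powers (PySem.List.slice powers none (some L)) L
            (PySem.List.pyRange 0 n L) 0) ↔
          PySem.List.slice powers (some L) (some (L * m)) =
            PySem.List.slice powers none (some (L * (m - 1))))) →
      pyA_outer powers m n cands = pyB_loop powers m cands := by
  intro cands
  induction cands with
  | nil => intro _; rfl
  | cons L rest ih =>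
      intro h
      have hL := h L (by simp)
      simp only [pyA_outer, pyB_loop]
      by_cases hb : PySem.List.slice powers (some L) (some (L * m)) =
          PySem.List.slice powers none (some (L * (m - 1)))
      · rw [if_pos hb, if_pos (hL.mpr hb)]
      · rw [if_neg hb, if_neg (fun hc => hb (hL.mp hc))]
        exact ih (fun L' hL' => h L' (by simp [hL']))

-- ===== VERDICT (by name: the statement is the Claim_ definition above) =====
theorem find_repeating_block_py_spec : Claim_equal_find_repeating_block_py := by
  intro powers mbl m _ hPre
  obtain ⟨hmbl, hm0⟩ := hPre
  unfold Spec_find_repeating_block_py find_repeating_block_py find_repeating_block_py_alt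
  have hn0 : (0 : Int) ≤ (powers.length : Int) := Int.natCast_nonneg _
  by_cases hm : 1 ≤ m
  · by_cases hg : (powers.length : Int) < mbl * m
    · rw [if_pos hg]
      have hfd : PySem.Int.floordiv (powers.length : Int) m < mbl :=
        (PySem.Int.floordiv_lt_iff_lt_mul (by omega)).mpr hg
      rw [PySem.List.pyRange_one_eq_nil (by omega)]
      rfl
    · rw [if_neg hg]
      apply loops_eq
      intro L hL
      rw [PySem.List.mem_pyRange_one] at hL
      have hLfd : L ≤ PySem.Int.floordiv (powers.length : Int) m := by omega
      have hLm : L * m ≤ (powers.length : Int) :=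
        (PySem.Int.le_floordiv_iff_mul_le (by omega)).mp hLfd
      exact cand_iff powers L m hm (by omega) hLm
  · have hmneg : m ≤ -1 := by omega
    have hg : ¬ (powers.length : Int) < mbl * m := by nlinarith
    rw [if_neg hg]
    have hfd : PySem.Int.floordiv (powers.length : Int) m ≤ 0 := by
      have hed : (powers.length : Int) / m ≤ 0 := Int.ediv_nonpos_of_nonneg_of_nonpos hn0 (by omega)
      have := @Int.fdiv_eq_ediv (powers.length : Int) m
      unfold PySem.Int.floordiv
      rw [this]
      split <;> omega
    rw [PySem.List.pyRange_one_eq_nil (by omega)]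
    rfl
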